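-- pv_equiv track=rewrite | github.com/Shadow-919/ResumeRadar | utils/education_analyzer.py | _get_domain_for_branch
-- ===== SOURCE A (Python) =====
-- def _get_domain_for_branch(branch_text, education_data):
--     """
--     Map a branch text to its domain using domain_mappings
--
--     CRITICAL: Handles "computer" and other keywords specially to ensure correct domain mapping
--
--     Args:
--         branch_text: Branch name (e.g., "Computer Science", "Mechanical")
--         education_data: Loaded education data dictionary
--
--     Returns:
--         Domain name (e.g., "computer", "mechanical", "finance", "generic")
--     """
--     if not branch_text:
--         return "generic"
--
--     branch_lower = branch_text.lower().strip()
--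
--     # Special cases for common keywords
--     if branch_lower in ["computer", "computers", "computing"]:
--         return "computer"
--     if branch_lower in ["mechanical", "mech"]:
--         return "mechanical"
--     if branch_lower in ["finance", "accounting"]:
--         return "finance"
--     if branch_lower in ["management", "business"]:
--         return "business"
--
--     domain_mappings = education_data.get("domain_mappings", {})
--
--     # Check exact match first
--     for domain, branches in domain_mappings.items():
--         if branch_lower in [b.lower() for b in branches]:
--             return domain
--
--     # Check if any branch keyword is contained in the branch_text
--     for domain, branches in domain_mappings.items():
--         for b in branches:
--             if b.lower() in branch_lower:
--                 return domain
--
--     return "generic"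
-- ===== SOURCE B (Python) =====
-- _SPECIAL = {
--     "computer": "computer", "computers": "computer", "computing": "computer",
--     "mechanical": "mechanical", "mech": "mechanical",
--     "finance": "finance", "accounting": "finance",
--     "management": "business", "business": "business",
-- }
--
-- def _get_domain_for_branch(branch_text, education_data):
--     if not branch_text:
--         return "generic"
--
--     branch_lower = branch_text.lower().strip()
--
--     if branch_lower in _SPECIAL:
--         return _SPECIAL[branch_lower]
--
--     # Flatten the mapping once into (lowered keyword, domain) pairs in
--     # insertion order, then walk that flat list a single time: an exact
--     # hit returns immediately, the first containment hit is remembered.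
--     pairs = [(b.lower(), domain)
--              for domain, branches in education_data.get("domain_mappings", {}).items()
--              for b in branches]
--     candidate = None
--     for key, domain in pairs:
--         if key == branch_lower:
--             return domain
--         if candidate is None and key in branch_lower:
--             candidate = domain
--     return candidate if candidate is not None else "generic"
-- ===== Notes on version B (the rewrite author's own statement) =====
-- stated objective: alternative
-- what changed: Replaces A's hardcoded if-chain by a table lookup and A's two nested priority-ordered scans over domain_mappings by a flattening of the mapping into (lowered-keyword, domain) pairs followed by a single linear walk that returns on an exact hit and remembers the first containment hit as a fallback candidate.
import Mathlib
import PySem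

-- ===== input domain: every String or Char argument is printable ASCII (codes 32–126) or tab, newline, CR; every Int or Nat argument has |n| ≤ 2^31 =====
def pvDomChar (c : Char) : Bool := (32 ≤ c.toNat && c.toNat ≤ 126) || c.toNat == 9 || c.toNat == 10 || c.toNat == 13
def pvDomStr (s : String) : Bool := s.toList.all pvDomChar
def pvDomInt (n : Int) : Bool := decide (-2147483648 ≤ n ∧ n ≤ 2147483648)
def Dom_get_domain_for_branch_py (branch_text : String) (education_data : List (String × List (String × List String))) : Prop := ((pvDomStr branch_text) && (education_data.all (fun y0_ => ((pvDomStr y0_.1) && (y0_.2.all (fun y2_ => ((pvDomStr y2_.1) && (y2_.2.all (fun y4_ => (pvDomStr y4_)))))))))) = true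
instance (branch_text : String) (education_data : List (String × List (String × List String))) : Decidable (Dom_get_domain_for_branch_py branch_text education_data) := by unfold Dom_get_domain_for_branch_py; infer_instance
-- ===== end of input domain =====

-- B: table lookup for the special cases, then a flattened (keyword, domain) list walked once
-- (exact hit returns, first containment hit remembered) instead of A's if-chain and two nested
-- priority-ordered scans; same cost, different decomposition.

-- ===== PORT A =====
-- first exact-match loop: return domain whose lowered branch list contains branch_lower
def pvExact (bl : List Char) : List (String × List String) → Option String
  | [] => none
  | (domain, branches) :: rest =>
    if (branches.map (fun b => PySem.Chars.lower b.toList)).contains bl then some domain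
    else pvExact bl rest

-- second loop: return domain of the first branch keyword contained in branch_lower
def pvContain (bl : List Char) : List (String × List String) → Option String
  | [] => none
  | (domain, branches) :: rest =>
    if branches.any (fun b => PySem.Chars.isIn (PySem.Chars.lower b.toList) bl) then some domain
    else pvContain bl rest

def get_domain_for_branch_py (branch_text : String) (education_data : List (String × List (String × List String))) : String :=
  if branch_text.toList = [] then "generic"
  else
    let bl := PySem.Chars.strip (PySem.Chars.lower branch_text.toList)
    if bl = "computer".toList ∨ bl = "computers".toList ∨ bl = "computing".toList then "computer"
    else if bl = "mechanical".toList ∨ bl = "mech".toList then "mechanical"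
    else if bl = "finance".toList ∨ bl = "accounting".toList then "finance"
    else if bl = "management".toList ∨ bl = "business".toList then "business"
    else
      let dm := (education_data.lookup "domain_mappings").getD []
      match pvExact bl dm with
      | some d => d
      | none =>
        match pvContain bl dm with
        | some d => d
        | none => "generic"

-- ===== PORT B =====
-- the special-case table (_SPECIAL in Source B)
def pvSpecial : List (List Char × String) :=
  [("computer".toList, "computer"), ("computers".toList, "computer"), ("computing".toList, "computer"),
   ("mechanical".toList, "mechanical"), ("mech".toList, "mechanical"),
   ("finance".toList, "finance"), ("accounting".toList, "finance"),
   ("management".toList, "business"), ("business".toList, "business")]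

-- flatten the mapping into (lowered keyword, domain) pairs in insertion order
def pvFlat (dm : List (String × List String)) : List (List Char × String) :=
  dm.flatMap (fun p => p.2.map (fun b => (PySem.Chars.lower b.toList, p.1)))

-- one walk over the flat pairs; cand holds the first containment hit
def pvWalk (bl : List Char) (cand : Option String) : List (List Char × String) → String
  | [] => cand.getD "generic"
  | (key, domain) :: rest =>
    if key == bl then domain
    else pvWalk bl (if cand.isNone && PySem.Chars.isIn key bl then some domain else cand) rest

def get_domain_for_branch_py_alt (branch_text : String) (education_data : List (String × List (String × List String))) : String :=
  if branch_text.toList = [] then "generic"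
  else
    let bl := PySem.Chars.strip (PySem.Chars.lower branch_text.toList)
    match pvSpecial.lookup bl with
    | some d => d
    | none => pvWalk bl none (pvFlat ((education_data.lookup "domain_mappings").getD []))

-- ===== PRECONDITION & SPEC =====
def Spec_get_domain_for_branch_py (branch_text : String) (education_data : List (String × List (String × List String))) (out : String) : Prop := out = get_domain_for_branch_py_alt branch_text education_data
instance (branch_text : String) (education_data : List (String × List (String × List String))) (out : String) : Decidable (Spec_get_domain_for_branch_py branch_text education_data out) := by unfold Spec_get_domain_for_branch_py; infer_instance

-- ===== CLAIM (what is proved, stated in full; the proofs are below) =====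
def Claim_equal_get_domain_for_branch_py : Prop := ∀ (branch_text : String) (education_data : List (String × List (String × List String))), Dom_get_domain_for_branch_py branch_text education_data → Spec_get_domain_for_branch_py branch_text education_data (get_domain_for_branch_py branch_text education_data)

-- ===== LEMMAS AND PROOFS =====

-- walking one domain's flattened segment: an exact hit returns the domain,
-- otherwise the candidate picks up the first containment hit of the segment
theorem pvWalk_seg (bl : List Char) (domain : String) (branches : List String)
    (rest : List (List Char × String)) (cand : Option String) :
    pvWalk bl cand (branches.map (fun b => (PySem.Chars.lower b.toList, domain)) ++ rest) =
      if branches.any (fun b => PySem.Chars.lower b.toList == bl) then domain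
      else pvWalk bl
        (if cand.isNone && branches.any (fun b => PySem.Chars.isIn (PySem.Chars.lower b.toList) bl)
         then some domain else cand) rest := by
  induction branches generalizing cand with
  | nil => cases cand <;> rfl
  | cons b t ih =>
    simp only [List.map_cons, List.cons_append, pvWalk, List.any_cons]
    by_cases hx : (PySem.Chars.lower b.toList == bl) = true
    · simp [hx]
    · simp only [Bool.not_eq_true] at hx
      simp only [hx, Bool.false_eq_true, if_false, Bool.false_or, ih]
      congr 1
      cases cand with
      | some c => simp
      | none =>
        by_cases hc : PySem.Chars.isIn (PySem.Chars.lower b.toList) bl = true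
        · simp [hc]
        · simp only [Bool.not_eq_true] at hc
          simp [hc]

-- A's exact membership test and the segment's `any` test agree
theorem exact_test_eq (bl : List Char) (branches : List String) :
    (branches.map (fun b => PySem.Chars.lower b.toList)).contains bl
      = branches.any (fun b => PySem.Chars.lower b.toList == bl) := by
  induction branches with
  | nil => rfl
  | cons h t ih =>
    simp only [List.map_cons, List.contains_cons, List.any_cons, ← ih]
    rw [BEq.comm (a := bl) (b := PySem.Chars.lower h.toList)]

-- the single flat walk equals: exact result, else candidate, else containment scan
theorem pvWalk_flat (bl : List Char) (cand : Option String) (dm : List (String × List String)) :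
    pvWalk bl cand (pvFlat dm) =
      match pvExact bl dm with
      | some d => d
      | none =>
        match cand with
        | some c => c
        | none =>
          match pvContain bl dm with
          | some d => d
          | none => "generic" := by
  induction dm generalizing cand with
  | nil => cases cand <;> rfl
  | cons p rest ih =>
    obtain ⟨domain, branches⟩ := p
    simp only [pvFlat, List.flatMap_cons, pvExact, pvContain, exact_test_eq]
    rw [show (rest.flatMap fun p => p.2.map (fun b => (PySem.Chars.lower b.toList, p.1))) = pvFlat rest from rfl]
    rw [pvWalk_seg]
    by_cases hx : branches.any (fun b => PySem.Chars.lower b.toList == bl) = true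
    · simp [hx]
    · simp only [Bool.not_eq_true] at hx
      simp only [hx, Bool.false_eq_true, if_false, ih]
      cases cand with
      | some c => simp
      | none =>
        by_cases hc : branches.any (fun b => PySem.Chars.isIn (PySem.Chars.lower b.toList) bl) = true
        · simp [hc]
        · simp only [Bool.not_eq_true] at hc
          simp [hc]

-- ===== VERDICT (by name: the statement is the Claim_ definition above) =====
theorem get_domain_for_branch_py_spec : Claim_equal_get_domain_for_branch_py := by
  intro branch_text education_data _
  unfold Spec_get_domain_for_branch_py get_domain_for_branch_py get_domain_for_branch_py_alt
  simp only [pvWalk_flat, pvSpecial, List.lookup]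
  split_ifs with h0 h1 h2 h3 h4
  · rfl
  · rcases h1 with h | h | h <;> rw [h] <;> rfl
  · rcases h2 with h | h <;> rw [h] <;> rfl
  · rcases h3 with h | h <;> rw [h] <;> rfl
  · rcases h4 with h | h <;> rw [h] <;> rfl
  · push Not at h1 h2 h3 h4
    obtain ⟨a1, a2, a3⟩ := h1
    obtain ⟨b1, b2⟩ := h2
    obtain ⟨c1, c2⟩ := h3
    obtain ⟨d1, d2⟩ := h4
    simp only [beq_eq_false_iff_ne.mpr a1, beq_eq_false_iff_ne.mpr a2, beq_eq_false_iff_ne.mpr a3,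
      beq_eq_false_iff_ne.mpr b1, beq_eq_false_iff_ne.mpr b2, beq_eq_false_iff_ne.mpr c1,
      beq_eq_false_iff_ne.mpr c2, beq_eq_false_iff_ne.mpr d1, beq_eq_false_iff_ne.mpr d2]
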